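-- pv_equiv track=rewrite | github.com/mitsurukikkawa/Python | DeepQNetwork/qlearning-ab.py | int_to_state
-- ===== SOURCE A (Python) =====
-- STR_LEN = 8
--
-- def int_to_state(n):
--     ret = ""
--     for i in range(STR_LEN):
--         if (n >> i) & 1:
--             ret += "B"
--         else:
--             ret += "A"
--     return ret
-- ===== SOURCE B (Python) =====
-- def int_to_state(n):
--     bits = format(n % 256, '08b')
--     return bits[::-1].translate(str.maketrans('01', 'AB'))
-- ===== Notes on version B (the rewrite author's own statement) =====
-- stated objective: idiomatic
-- what changed: Replaces the explicit per-bit loop with string accumulation by a closed-form pipeline: format(n % 256, '08b'), reverse, translate '0'/'1' to 'A'/'B'.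
import Mathlib
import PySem

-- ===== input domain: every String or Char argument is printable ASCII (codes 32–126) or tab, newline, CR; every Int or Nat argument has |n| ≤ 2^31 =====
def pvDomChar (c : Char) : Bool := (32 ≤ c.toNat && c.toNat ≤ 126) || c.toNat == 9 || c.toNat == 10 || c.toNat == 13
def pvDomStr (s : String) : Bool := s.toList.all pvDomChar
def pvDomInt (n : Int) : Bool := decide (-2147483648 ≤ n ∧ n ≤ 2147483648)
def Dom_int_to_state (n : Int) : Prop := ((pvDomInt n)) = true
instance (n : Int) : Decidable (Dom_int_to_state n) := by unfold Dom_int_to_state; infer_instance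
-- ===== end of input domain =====

-- ===== PORT A =====
def int_to_state (n : Int) : String :=
  (PySem.List.pyRange 0 8 1).foldl
    (fun ret i => if PySem.Int.band (n >>> i.toNat) 1 ≠ 0 then ret ++ "B" else ret ++ "A") ""

-- ===== PORT B =====
-- B: closed-form pipeline instead of A's per-bit loop (idiomatic; same result).
-- format(m, '08b') for a nonnegative low-byte value m: its eight binary digits, most significant first (exact there)
def fmtBin8 (m : Int) : List Char :=
  (List.range 8).reverse.map (fun i => if PySem.Int.mod (m >>> i) 2 = 1 then '1' else '0')

def int_to_state_alt (n : Int) : String :=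
  let bits := fmtBin8 (PySem.Int.mod n 256)
  -- bits[::-1].translate(str.maketrans('01','AB'))
  String.ofList (bits.reverse.map (fun c => if c = '0' then 'A' else 'B'))

-- ===== PRECONDITION & SPEC =====
def Spec_int_to_state (n : Int) (out : String) : Prop := out = int_to_state_alt n
instance (n : Int) (out : String) : Decidable (Spec_int_to_state n out) := by unfold Spec_int_to_state; infer_instance

-- ===== CLAIM (what is proved, stated in full; the proofs are below) =====
def Claim_equal_int_to_state : Prop := ∀ (n : Int), Dom_int_to_state n → Spec_int_to_state n (int_to_state n)

-- ===== LEMMAS AND PROOFS =====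

-- ===== VERDICT (by name: the statement is the Claim_ definition above) =====
-- the 8 bit-tests only depend on n mod 256
lemma bit_mod256 (n : Int) (i : Nat) (h : i < 8) :
    (n % 256) / 2 ^ i % 2 = n / 2 ^ i % 2 := by
  interval_cases i <;> omega

-- the claim, verified for all 256 residues
set_option maxRecDepth 4000 in
lemma residue_case : ∀ m : Fin 256, int_to_state (m.val : Int) = int_to_state_alt (m.val : Int) := by
  decide

lemma band_shift_bit (x : Int) (k : Nat) :
    PySem.Int.band (x >>> (k : Int)) 1 = x / 2 ^ k % 2 := by
  rw [Int.shiftRight_natCast_right, PySem.Int.band_one,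
    PySem.Int.mod_eq_emod_of_pos (by omega), Int.shiftRight_eq_div_pow]
  norm_cast

lemma A_eq_of_bits (a b : Int)
    (h : ∀ i : Int, 0 ≤ i → i < 8 → PySem.Int.band (a >>> i) 1 = PySem.Int.band (b >>> i) 1) :
    int_to_state a = int_to_state b := by
  simp only [int_to_state]
  have hr : PySem.List.pyRange 0 8 1 = [0, 1, 2, 3, 4, 5, 6, 7] := by decide
  rw [hr]
  simp only [List.foldl]
  norm_num [h 0 (by omega) (by omega), h 1 (by omega) (by omega), h 2 (by omega) (by omega),
    h 3 (by omega) (by omega), h 4 (by omega) (by omega), h 5 (by omega) (by omega),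
    h 6 (by omega) (by omega), h 7 (by omega) (by omega)]

theorem int_to_state_spec : Claim_equal_int_to_state := by
  intro n _
  unfold Spec_int_to_state
  have hm : PySem.Int.mod n 256 = n % 256 := PySem.Int.mod_eq_emod_of_pos (by omega)
  have h1 : int_to_state n = int_to_state (n % 256) := by
    apply A_eq_of_bits
    intro i h0 hi
    obtain ⟨k, rfl⟩ : ∃ k : Nat, i = (k : Int) := ⟨i.toNat, (Int.toNat_of_nonneg h0).symm⟩
    rw [band_shift_bit, band_shift_bit, bit_mod256 n k (by exact_mod_cast hi)]
  have h2 : int_to_state_alt n = int_to_state_alt (n % 256) := by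
    simp only [int_to_state_alt, hm]
    have : PySem.Int.mod (n % 256) 256 = n % 256 := by
      rw [PySem.Int.mod_eq_emod_of_pos (by omega), Int.emod_emod_of_dvd _ (by norm_num)]
    rw [this]
  have hb : (0 : Int) ≤ n % 256 := Int.emod_nonneg n (by norm_num)
  have hlt : n % 256 < 256 := Int.emod_lt_of_pos n (by norm_num)
  have hcast : ((n % 256).toNat : Int) = n % 256 := Int.toNat_of_nonneg hb
  have := residue_case ⟨(n % 256).toNat, by omega⟩
  rw [h1, h2, ← hcast]
  exact this
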